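-- pv_equiv track=rewrite | github.com/citrusfruits6276/Codingtest_Python | 프로그래머스/1/42840. 모의고사/모의고사.py | solution
-- ===== SOURCE A (Python) =====
-- def solution(answers):
--     scores = [0] * 3
--     nodap = [
--     [1, 2, 3, 4, 5],
--     [2, 1, 2, 3, 2, 4, 2, 5],
--     [3, 3, 1, 1, 2, 2, 4, 4, 5, 5]
--     ]
--     result = []
--
--     for i, answer in enumerate(answers):
--         for j, nod in enumerate(nodap):
--             if answer == nod[i % len(nod)]:
--                 scores[j] += 1
--     max_scores = max(scores)
--
--     for i, score in enumerate(scores):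
--         if score == max_scores:
--             result.append(i+1)
--
--     return result
-- ===== SOURCE B (Python) =====
-- def solution(answers):
--     # Bucket-count answers once by (position mod 40, value) -- 40 = lcm of the
--     # three pattern lengths -- then score each pattern from the table alone.
--     patterns = [
--         [1, 2, 3, 4, 5],
--         [2, 1, 2, 3, 2, 4, 2, 5],
--         [3, 3, 1, 1, 2, 2, 4, 4, 5, 5],
--     ]
--     cnt = {}
--     for i, a in enumerate(answers):
--         k = (i % 40, a)
--         cnt[k] = cnt.get(k, 0) + 1
--     scores = [sum(cnt.get((r, p[r % len(p)]), 0) for r in range(40))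
--               for p in patterns]
--     m = max(scores)
--     return [i + 1 for i, s in enumerate(scores) if s == m]
-- ===== Notes on version B (the rewrite author's own statement) =====
-- stated objective: alternative
-- what changed: B first bucket-counts the answers into a hash table keyed by (index mod 40, value) (40 = lcm of the pattern lengths) in one pattern-free pass, then computes each pattern's score purely from 40 table lookups without rescanning the answers, whereas A scores all three patterns inside a fused loop over the answers with modular indexing.
import Mathlib
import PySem

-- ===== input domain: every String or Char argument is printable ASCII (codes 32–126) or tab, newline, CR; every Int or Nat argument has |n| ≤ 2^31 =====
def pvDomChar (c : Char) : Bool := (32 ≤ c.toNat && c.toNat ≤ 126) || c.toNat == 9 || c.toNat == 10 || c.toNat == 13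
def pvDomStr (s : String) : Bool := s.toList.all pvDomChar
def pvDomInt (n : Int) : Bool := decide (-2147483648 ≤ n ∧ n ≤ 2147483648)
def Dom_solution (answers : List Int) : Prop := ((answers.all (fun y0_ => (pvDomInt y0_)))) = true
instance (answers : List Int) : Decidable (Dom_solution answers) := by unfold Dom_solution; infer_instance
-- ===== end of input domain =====

-- B bucket-counts the answers once into a dict keyed by (index mod 40, value) (40 = lcm of the
-- pattern lengths) and scores each pattern from 40 table lookups without rescanning the answers,
-- instead of A's fused per-answer loop over all three patterns (alternative; same cost).

-- ===== PORT A =====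
-- the three fixed guess patterns
def pvNodap : List (List Int) := [[1, 2, 3, 4, 5], [2, 1, 2, 3, 2, 4, 2, 5], [3, 3, 1, 1, 2, 2, 4, 4, 5, 5]]

-- nod[i % len(nod)]: index is a Python %, always in range for these nonempty patterns, so pyGetD is exact
-- scores[j] += 1: j comes from enumerate over the 3 patterns, so 0 ≤ j < 3 and List.set at j.toNat is exact
def solution (answers : List Int) : List Int :=
  let scores : List Int :=
    (PySem.List.enumerate answers 0).foldl
      (fun sc p =>
        (PySem.List.enumerate pvNodap 0).foldl
          (fun sc q =>
            if p.2 = PySem.List.pyGetD q.2 (PySem.Int.mod p.1 (q.2.length : Int)) 0 then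
              sc.set q.1.toNat (sc.getD q.1.toNat 0 + 1)
            else sc)
          sc)
      [0, 0, 0]
  let max_scores : Int := (PySem.List.max? scores (fun x => x)).getD 0  -- scores has 3 elements, max never raises
  (PySem.List.enumerate scores 0).foldl
    (fun result p => if p.2 = max_scores then result ++ [p.1 + 1] else result) []

-- ===== PORT B =====
-- cnt[k] = cnt.get(k, 0) + 1 over keys (i % 40, a); p[r % len(p)] is in range (patterns nonempty), so pyGetD is exact
def solution_alt (answers : List Int) : List Int :=
  let patterns : List (List Int) := [[1, 2, 3, 4, 5], [2, 1, 2, 3, 2, 4, 2, 5], [3, 3, 1, 1, 2, 2, 4, 4, 5, 5]]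
  let cnt : PySem.Dict (Int × Int) Int :=
    (PySem.List.enumerate answers 0).foldl
      (fun d q => d.insert (PySem.Int.mod q.1 40, q.2) (d.getD (PySem.Int.mod q.1 40, q.2) 0 + 1))
      PySem.Dict.empty
  let scores : List Int := patterns.map (fun p =>
    ((PySem.List.pyRange 0 40 1).map
      (fun r => cnt.getD (r, PySem.List.pyGetD p (PySem.Int.mod r (p.length : Int)) 0) 0)).sum)
  let m : Int := (PySem.List.max? scores (fun x => x)).getD 0
  ((PySem.List.enumerate scores 0).filter (fun q => q.2 = m)).map (fun q => q.1 + 1)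

-- ===== PRECONDITION & SPEC =====
def Spec_solution (answers : List Int) (out : List Int) : Prop := out = solution_alt answers
instance (answers : List Int) (out : List Int) : Decidable (Spec_solution answers out) := by unfold Spec_solution; infer_instance

-- ===== CLAIM (what is proved, stated in full; the proofs are below) =====
def Claim_equal_solution : Prop := ∀ (answers : List Int), Dom_solution answers → Spec_solution answers (solution answers)

-- ===== LEMMAS AND PROOFS =====

-- the fused A-loop from accumulator [x,y,z] adds the three independent scores
theorem pvMain (ans : List Int) (s : Int) (x y z : Int) :
    (PySem.List.enumerate ans s).foldl
      (fun sc p =>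
        (PySem.List.enumerate pvNodap 0).foldl
          (fun sc q =>
            if p.2 = PySem.List.pyGetD q.2 (PySem.Int.mod p.1 (q.2.length : Int)) 0 then
              sc.set q.1.toNat (sc.getD q.1.toNat 0 + 1)
            else sc)
          sc)
      [x, y, z]
    = [x + ((PySem.List.enumerate ans s).map
            (fun q => if q.2 = PySem.List.pyGetD [1,2,3,4,5] (PySem.Int.mod q.1 (([1,2,3,4,5] : List Int).length : Int)) 0 then (1 : Int) else 0)).sum,
       y + ((PySem.List.enumerate ans s).map
            (fun q => if q.2 = PySem.List.pyGetD [2,1,2,3,2,4,2,5] (PySem.Int.mod q.1 (([2,1,2,3,2,4,2,5] : List Int).length : Int)) 0 then (1 : Int) else 0)).sum,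
       z + ((PySem.List.enumerate ans s).map
            (fun q => if q.2 = PySem.List.pyGetD [3,3,1,1,2,2,4,4,5,5] (PySem.Int.mod q.1 (([3,3,1,1,2,2,4,4,5,5] : List Int).length : Int)) 0 then (1 : Int) else 0)).sum] := by
  induction ans generalizing s x y z with
  | nil => simp [PySem.List.enumerate_nil]
  | cons a t ih =>
    rw [PySem.List.enumerate_cons]
    simp only [List.foldl_cons]
    have hinner :
        (PySem.List.enumerate pvNodap 0).foldl
          (fun sc q =>
            if a = PySem.List.pyGetD q.2 (PySem.Int.mod s (q.2.length : Int)) 0 then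
              sc.set q.1.toNat (sc.getD q.1.toNat 0 + 1)
            else sc)
          [x, y, z]
        = [x + (if a = PySem.List.pyGetD [1,2,3,4,5] (PySem.Int.mod s (([1,2,3,4,5] : List Int).length : Int)) 0 then (1 : Int) else 0),
           y + (if a = PySem.List.pyGetD [2,1,2,3,2,4,2,5] (PySem.Int.mod s (([2,1,2,3,2,4,2,5] : List Int).length : Int)) 0 then (1 : Int) else 0),
           z + (if a = PySem.List.pyGetD [3,3,1,1,2,2,4,4,5,5] (PySem.Int.mod s (([3,3,1,1,2,2,4,4,5,5] : List Int).length : Int)) 0 then (1 : Int) else 0)] := by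
      simp [pvNodap, PySem.List.enumerate]
      split_ifs <;> simp [List.set]
    rw [hinner, ih]
    simp
    constructor
    · ring
    constructor
    · ring
    · ring

-- a (r = u)-indicator sums to 0 over a list avoiding u
theorem pvSumZero (l : List Int) (u : Int) (hu : u ∉ l) (g : Int → Int) (a : Int) :
    (l.map (fun r => if ((r, g r) : Int × Int) = (u, a) then (1 : Int) else 0)).sum = 0 := by
  simp only [Prod.mk.injEq]
  induction l with
  | nil => simp
  | cons x t ih =>
    simp only [List.mem_cons, not_or] at hu
    have hx : ¬ (x = u ∧ g x = a) := fun h => hu.1 h.1.symm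
    simp only [List.map_cons, List.sum_cons, if_neg hx, zero_add]
    exact ih hu.2

-- over a nodup list containing u, the indicator sum is the single hit at u
theorem pvSumSingle (l : List Int) (u : Int) (hnd : l.Nodup) (hu : u ∈ l) (g : Int → Int) (a : Int) :
    (l.map (fun r => if ((r, g r) : Int × Int) = (u, a) then (1 : Int) else 0)).sum
      = if a = g u then (1 : Int) else 0 := by
  induction l with
  | nil => simp at hu
  | cons x t ih =>
    rcases List.mem_cons.mp hu with h | h
    · subst h
      have hnt : u ∉ t := (List.nodup_cons.mp hnd).1
      have hz := pvSumZero t u hnt g a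
      simp only [Prod.mk.injEq] at hz ⊢
      simp only [List.map_cons, List.sum_cons, hz, add_zero]
      by_cases hax : a = g u
      · simp [hax]
      · have hne : ¬ g u = a := fun h => hax h.symm
        simp [hne, hax]
    · have hnd' := (List.nodup_cons.mp hnd).2
      have hxu : ¬ (x = u ∧ g x = a) := by
        rintro ⟨rfl, -⟩
        exact (List.nodup_cons.mp hnd).1 h
      have := ih hnd' h
      simp only [Prod.mk.injEq] at this ⊢
      simp only [List.map_cons, List.sum_cons, if_neg hxu, zero_add]
      exact this

-- the same single-hit sum with the equation written the other way round
theorem pvHit (l : List Int) (u : Int) (hnd : l.Nodup) (hu : u ∈ l) (g : Int → Int) (a : Int) :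
    (l.map (fun r => if ((u, a) : Int × Int) = (r, g r) then (1 : Int) else 0)).sum
      = if a = g u then (1 : Int) else 0 := by
  have hfun : (fun r => if ((u, a) : Int × Int) = (r, g r) then (1 : Int) else 0)
      = (fun r => if ((r, g r) : Int × Int) = (u, a) then (1 : Int) else 0) := by
    funext r
    by_cases h : ((u, a) : Int × Int) = (r, g r)
    · have h1 : u = r := congrArg Prod.fst h
      have h2 : a = g r := congrArg Prod.snd h
      subst h1
      simp [h, h2]
    · have h2 : ¬ ((r, g r) : Int × Int) = (u, a) := fun h3 => h h3.symm
      simp [h2, h]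
  rw [hfun]
  exact pvSumSingle l u hnd hu g a

-- B's 40-bucket lookup sum for a pattern equals the direct per-answer indicator sum
theorem pvBridge (p : List Int) (hp : 0 < p.length) (hd : ((p.length : Int)) ∣ 40)
    (ans : List Int) (s : Int) :
    ((PySem.List.pyRange 0 40 1).map (fun r =>
        ((((PySem.List.enumerate ans s).map (fun q => (PySem.Int.mod q.1 40, q.2))).count
          (r, PySem.List.pyGetD p (PySem.Int.mod r (p.length : Int)) 0) : Int)))).sum
    = ((PySem.List.enumerate ans s).map
        (fun q => if q.2 = PySem.List.pyGetD p (PySem.Int.mod q.1 (p.length : Int)) 0 then (1 : Int) else 0)).sum := by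
  induction ans generalizing s with
  | nil => simp [PySem.List.enumerate_nil]
  | cons a t ih =>
    rw [PySem.List.enumerate_cons]
    simp only [List.map_cons, List.sum_cons, List.count_cons]
    push_cast
    simp only [beq_iff_eq]
    rw [PySem.List.sum_map_add_int (PySem.List.pyRange 0 40 1)
      (fun r => ((((PySem.List.enumerate t (s+1)).map (fun q => (PySem.Int.mod q.1 40, q.2))).count
          (r, PySem.List.pyGetD p (PySem.Int.mod r (p.length : Int)) 0) : Int)))
      (fun r => if ((PySem.Int.mod s 40, a) : Int × Int)
          = (r, PySem.List.pyGetD p (PySem.Int.mod r (p.length : Int)) 0) then (1 : Int) else 0)]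
    rw [ih (s+1)]
    have hL : (0 : Int) < (p.length : Int) := by exact_mod_cast hp
    have hu : PySem.Int.mod s 40 ∈ PySem.List.pyRange 0 40 1 := by
      rw [PySem.List.mem_pyRange_one]
      exact ⟨PySem.Int.mod_nonneg s (by norm_num), PySem.Int.mod_lt s (by norm_num)⟩
    have hsingle := pvHit (PySem.List.pyRange 0 40 1) (PySem.Int.mod s 40)
      (PySem.List.nodup_pyRange_one 0 40) hu
      (fun r => PySem.List.pyGetD p (PySem.Int.mod r (p.length : Int))  0) a
    rw [hsingle]
    have hmm : PySem.Int.mod (PySem.Int.mod s 40) (p.length : Int) = PySem.Int.mod s (p.length : Int) := by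
      rw [PySem.Int.mod_eq_emod_of_pos (by norm_num : (0:Int) < (40:Int)),
          PySem.Int.mod_eq_emod_of_pos hL, PySem.Int.mod_eq_emod_of_pos hL]
      exact Int.emod_emod_of_dvd s hd
    rw [hmm]
    ring

-- the dict built by B's counting loop reads back as a count over the key list
theorem pvCntGen (l : List (Int × Int)) (d : PySem.Dict (Int × Int) Int) (k : Int × Int) :
    (l.foldl
      (fun d q => d.insert (PySem.Int.mod q.1 40, q.2) (d.getD (PySem.Int.mod q.1 40, q.2) 0 + 1)) d).getD k 0
    = d.getD k 0 + ((l.map (fun q => (PySem.Int.mod q.1 40, q.2))).count k : Int) := by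
  induction l generalizing d with
  | nil => simp
  | cons q t ih =>
    simp only [List.foldl_cons, List.map_cons, List.count_cons, beq_iff_eq]
    rw [ih, PySem.Dict.getD_insert]
    by_cases hk : k = (PySem.Int.mod q.1 40, q.2)
    · rw [if_pos hk, if_pos hk.symm, hk]
      push_cast
      ring
    · rw [if_neg hk, if_neg (fun h => hk h.symm)]
      push_cast
      ring

-- instantiated at the empty dict, for B's loop over enumerate
theorem pvCnt (answers : List Int) (k : Int × Int) :
    ((PySem.List.enumerate answers 0).foldl
      (fun d q => d.insert (PySem.Int.mod q.1 40, q.2) (d.getD (PySem.Int.mod q.1 40, q.2) 0 + 1))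
      PySem.Dict.empty).getD k 0
    = (((PySem.List.enumerate answers 0).map (fun q => (PySem.Int.mod q.1 40, q.2))).count k : Int) := by
  rw [pvCntGen]
  simp

-- the winner-collection loop of A equals B's filter/map on a concrete 3-list of scores
theorem pvFinal (a b c : Int) :
    (PySem.List.enumerate ([a, b, c] : List Int) 0).foldl
      (fun result p => if p.2 = (PySem.List.max? [a, b, c] (fun x => x)).getD 0 then result ++ [p.1 + 1] else result) []
    = ((PySem.List.enumerate ([a, b, c] : List Int) 0).filter
        (fun q => q.2 = (PySem.List.max? [a, b, c] (fun x => x)).getD 0)).map (fun q => q.1 + 1) := by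
  simp only [PySem.List.enumerate_cons, PySem.List.enumerate_nil, List.foldl_cons, List.foldl_nil,
    List.filter_cons, List.filter_nil, decide_eq_true_eq]
  rw [PySem.List.max?_id_cons]
  split_ifs <;> simp

-- ===== VERDICT (by name: the statement is the Claim_ definition above) =====
theorem solution_spec : Claim_equal_solution := by
  intro answers _
  unfold Spec_solution solution solution_alt
  simp only [List.map_cons, List.map_nil]
  rw [pvMain answers 0 0 0 0]
  simp only [zero_add, pvCnt]
  rw [pvBridge [1,2,3,4,5] (by norm_num) (by norm_num) answers 0,
      pvBridge [2,1,2,3,2,4,2,5] (by norm_num) (by norm_num) answers 0,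
      pvBridge [3,3,1,1,2,2,4,4,5,5] (by norm_num) (by norm_num) answers 0]
  exact pvFinal _ _ _
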